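-- pv_equiv track=rewrite | github.com/LiorSinai/NonogramSolver | guesser.py | get_sequence
-- ===== SOURCE A (Python) =====
-- BLACK = 1   # = 01 in binary
--
-- def get_sequence(arr):
--     white = True
--     sequence = []
--     positions = [] #where the sequences start and end
--     for idx, color in enumerate(arr):
--         if color == BLACK and white:
--             sequence.append(1)
--             positions.append([idx, idx])
--             white = False
--         elif color == BLACK and not white:
--             sequence[-1] += 1
--             positions[-1][1] = idx
--         else: #  color == WHITE or EITHER
--             white = True
--
--     return sequence, positions
-- ===== SOURCE B (Python) =====
-- BLACK = 1   # = 01 in binary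
--
-- def get_sequence(arr):
--     # run-skipping scan: find each maximal run of BLACK cells directly,
--     # no stateful `white` flag, no in-place updates of the last entry
--     sequence = []
--     positions = []
--     i, n = 0, len(arr)
--     while i < n:
--         if arr[i] == BLACK:
--             j = i
--             while j + 1 < n and arr[j + 1] == BLACK:
--                 j += 1
--             sequence.append(j - i + 1)
--             positions.append([i, j])
--             i = j + 1
--         else:
--             i += 1
--     return sequence, positions
-- ===== Notes on version B (the rewrite author's own statement) =====
-- stated objective: alternative
-- what changed: Replaces A's element-wise state machine (a `white` flag with append / mutate-last updates) by a run-skipping scan that locates each maximal BLACK run with an inner scan and emits its length and endpoints in one step.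
import Mathlib
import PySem

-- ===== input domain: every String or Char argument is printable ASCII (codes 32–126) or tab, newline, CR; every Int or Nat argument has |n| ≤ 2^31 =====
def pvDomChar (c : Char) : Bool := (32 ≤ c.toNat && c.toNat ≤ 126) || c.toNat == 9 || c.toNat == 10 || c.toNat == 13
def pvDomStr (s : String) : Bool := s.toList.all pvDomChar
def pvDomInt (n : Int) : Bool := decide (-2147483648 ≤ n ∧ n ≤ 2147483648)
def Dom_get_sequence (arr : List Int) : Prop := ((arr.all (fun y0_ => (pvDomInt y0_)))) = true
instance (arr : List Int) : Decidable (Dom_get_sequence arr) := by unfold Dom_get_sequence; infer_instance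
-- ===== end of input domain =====

-- B replaces A's element-wise state machine (white flag, mutate-last updates) by a
-- run-skipping scan emitting each maximal BLACK run in one step (alternative decomposition).


-- ===== PORT A =====
-- one step of A's loop body: state (white, sequence, positions), element (idx, color)
def pvStepA (st : Bool × List Int × List (List Int)) (p : Int × Int) :
    Bool × List Int × List (List Int) :=
  let white := st.1
  let seq := st.2.1
  let pos := st.2.2
  let idx := p.1
  let color := p.2
  if color = 1 ∧ white then
    (false, seq ++ [1], pos ++ [[idx, idx]])
  else if color = 1 ∧ ¬ white then
    -- sequence[-1] += 1 ; positions[-1][1] = idx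
    (false, seq.dropLast ++ [seq.getLastD 0 + 1],
            pos.dropLast ++ [[(pos.getLastD []).headD 0, idx]])
  else
    (true, seq, pos)

def get_sequence (arr : List Int) : List Int × List (List Int) :=
  ((PySem.List.enumerate arr 0).foldl pvStepA (true, [], [])).2

-- ===== PORT B =====
-- length of the leading run of BLACK (the inner `while` of Source B)
def pvLeadRun : List Int → Nat
  | [] => 0
  | x :: xs => if x = 1 then pvLeadRun xs + 1 else 0

-- the outer `while` of Source B: at a BLACK cell consume the whole run, else step by one
def pvAltGo : List Int → Int → List Int × List (List Int)
  | [], _ => ([], [])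
  | x :: xs, i =>
    if x = 1 then
      let k := pvLeadRun xs
      let r := pvAltGo (xs.drop k) (i + (k : Int) + 1)
      (((k : Int) + 1) :: r.1, [i, i + (k : Int)] :: r.2)
    else
      pvAltGo xs (i + 1)
termination_by l _ => l.length
decreasing_by
  · simp [List.length_drop]
  · simp

def get_sequence_alt (arr : List Int) : List Int × List (List Int) :=
  pvAltGo arr 0

-- ===== PRECONDITION & SPEC =====
def Spec_get_sequence (arr : List Int) (out : List Int × List (List Int)) : Prop := out = get_sequence_alt arr
instance (arr : List Int) (out : List Int × List (List Int)) : Decidable (Spec_get_sequence arr out) := by unfold Spec_get_sequence; infer_instance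

-- ===== CLAIM (what is proved, stated in full; the proofs are below) =====
def Claim_equal_get_sequence : Prop := ∀ (arr : List Int), Dom_get_sequence arr → Spec_get_sequence arr (get_sequence arr)

-- ===== LEMMAS AND PROOFS =====

lemma take_leadRun (xs : List Int) :
    xs.take (pvLeadRun xs) = List.replicate (pvLeadRun xs) 1 := by
  induction xs with
  | nil => simp [pvLeadRun]
  | cons x xs ih =>
      by_cases hx : x = 1
      · simp [pvLeadRun, hx, List.replicate_succ, ih]
      · simp [pvLeadRun, hx]

lemma head_drop_leadRun (xs : List Int) :
    (xs.drop (pvLeadRun xs)).head? ≠ some 1 := by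
  induction xs with
  | nil => simp [pvLeadRun]
  | cons x xs ih =>
      by_cases hx : x = 1
      · simpa [pvLeadRun, hx] using ih
      · simp [pvLeadRun, hx]

-- a run of k BLACK cells in the non-white state just extends the last entries
lemma fold_ones (k : Nat) :
    ∀ (i c a : Int) (s : List Int) (p : List (List Int)) (ys : List Int),
    (PySem.List.enumerate (List.replicate k 1 ++ ys) i).foldl pvStepA
        (false, s ++ [c], p ++ [[a, i - 1]])
    = (PySem.List.enumerate ys (i + k)).foldl pvStepA
        (false, s ++ [c + k], p ++ [[a, i + k - 1]]) := by
  induction k with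
  | zero => intro i c a s p ys; simp
  | succ k ih =>
      intro i c a s p ys
      rw [List.replicate_succ, List.cons_append, PySem.List.enumerate_cons, List.foldl_cons]
      have hstep : pvStepA (false, s ++ [c], p ++ [[a, i - 1]]) (i, 1)
          = (false, s ++ [c + 1], p ++ [[a, (i + 1) - 1]]) := by
        simp [pvStepA]
      rw [hstep, ih (i + 1) (c + 1) a s p ys]
      have h1 : i + 1 + (k : Int) = i + ((k : Nat) + 1 : Nat) := by push_cast; ring
      have h2 : c + 1 + (k : Int) = c + ((k : Nat) + 1 : Nat) := by push_cast; ring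
      rw [h1, h2]

-- from the non-white state, a non-BLACK head (or the empty tail) behaves as the white state
lemma fold_false_eq_true (arr : List Int) (h : arr.head? ≠ some 1) :
    ∀ (i : Int) (s : List Int) (p : List (List Int)),
    ((PySem.List.enumerate arr i).foldl pvStepA (false, s, p)).2
    = ((PySem.List.enumerate arr i).foldl pvStepA (true, s, p)).2 := by
  cases arr with
  | nil => intro i s p; simp
  | cons x xs =>
      intro i s p
      have hx : ¬ (x = 1) := by simpa using h
      rw [PySem.List.enumerate_cons, List.foldl_cons, List.foldl_cons]
      have : pvStepA (false, s, p) (i, x) = pvStepA (true, s, p) (i, x) := by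
        simp [pvStepA, hx]
      rw [this]

lemma fold_main (n : Nat) :
    ∀ (arr : List Int), arr.length ≤ n → ∀ (i : Int) (s : List Int) (p : List (List Int)),
    ((PySem.List.enumerate arr i).foldl pvStepA (true, s, p)).2
    = (s ++ (pvAltGo arr i).1, p ++ (pvAltGo arr i).2) := by
  induction n with
  | zero =>
      intro arr harr i s p
      have : arr = [] := List.length_eq_zero_iff.mp (Nat.le_zero.mp harr)
      subst this; simp [pvAltGo]
  | succ n ih =>
      intro arr harr i s p
      cases arr with
      | nil => simp [pvAltGo]
      | cons x xs =>
          by_cases hx : x = 1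
          · subst hx
            set k := pvLeadRun xs with hk
            have hsplit : xs = List.replicate k 1 ++ xs.drop k := by
              conv_lhs => rw [← List.take_append_drop k xs]
              rw [take_leadRun]
            rw [PySem.List.enumerate_cons, List.foldl_cons]
            have hstep : pvStepA (true, s, p) (i, 1)
                = (false, s ++ [1], p ++ [[i, (i + 1) - 1]]) := by
              simp [pvStepA]
            rw [hstep]
            conv_lhs => rw [hsplit]
            rw [fold_ones k (i + 1) 1 i s p (xs.drop k)]
            rw [fold_false_eq_true _ (head_drop_leadRun xs)]
            have hlen : (xs.drop k).length ≤ n := by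
              have hxs : xs.length ≤ n := Nat.lt_succ_iff.mp (by simpa using harr)
              simp [List.length_drop]; omega
            rw [ih (xs.drop k) hlen]
            have e1 : (1 : Int) + (k : Int) = (k : Int) + 1 := by ring
            have e2 : i + 1 + (k : Int) - 1 = i + (k : Int) := by ring
            have e3 : i + 1 + (k : Int) = i + (k : Int) + 1 := by ring
            rw [e1, e2, e3]
            simp [pvAltGo, ← hk]
          · rw [PySem.List.enumerate_cons, List.foldl_cons]
            have hstep : pvStepA (true, s, p) (i, x) = (true, s, p) := by
              simp [pvStepA, hx]
            rw [hstep, ih xs (Nat.lt_succ_iff.mp (by simpa using harr))]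
            simp [pvAltGo, hx]

-- ===== VERDICT (by name: the statement is the Claim_ definition above) =====
theorem get_sequence_spec : Claim_equal_get_sequence := by
  intro arr _
  unfold Spec_get_sequence get_sequence get_sequence_alt
  simpa using fold_main arr.length arr le_rfl 0 [] []
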